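-- pv_equiv track=rewrite | github.com/kthompson-irs/github_fedramp_ssp_evidence | fedramp_ia208_report.py | build_plain_text_report
-- ===== SOURCE A (Python) =====
-- def build_plain_text_report(markdown: str) -> str:
--     replacements = [
--         ("**", ""),
--         ("`", ""),
--         ("|", " | "),
--     ]
--     text = markdown
--     for old, new in replacements:
--         text = text.replace(old, new)
--     return text
-- ===== SOURCE B (Python) =====
-- def build_plain_text_report(markdown: str) -> str:
--     # single left-to-right scan instead of three sequential replace passes
--     out = []
--     i = 0
--     n = len(markdown)
--     while i < n:
--         c = markdown[i]
--         if c == '*' and i + 1 < n and markdown[i + 1] == '*':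
--             i += 2
--         elif c == '`':
--             i += 1
--         elif c == '|':
--             out.append(' | ')
--             i += 1
--         else:
--             out.append(c)
--             i += 1
--     return ''.join(out)
-- ===== Notes on version B (the rewrite author's own statement) =====
-- stated objective: alternative
-- what changed: Replaces the three sequential whole-string replace passes with a single left-to-right character scan (one-character lookahead) that performs all three substitutions in one traversal.
import Mathlib
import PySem

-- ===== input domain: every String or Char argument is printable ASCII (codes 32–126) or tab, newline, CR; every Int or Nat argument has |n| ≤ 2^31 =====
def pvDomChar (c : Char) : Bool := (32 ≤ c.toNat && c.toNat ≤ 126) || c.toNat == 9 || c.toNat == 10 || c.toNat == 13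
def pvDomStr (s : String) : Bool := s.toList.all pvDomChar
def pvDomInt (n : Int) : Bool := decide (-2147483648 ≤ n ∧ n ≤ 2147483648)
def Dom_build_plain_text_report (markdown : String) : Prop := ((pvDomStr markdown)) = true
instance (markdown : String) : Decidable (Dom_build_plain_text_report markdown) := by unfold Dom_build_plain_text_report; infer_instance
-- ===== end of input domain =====

-- B replaces A's three sequential str.replace passes by one left-to-right character scan; same result, single traversal.

-- ===== PORT A =====
def build_plain_text_report (markdown : String) : String :=
  let replacements : List (String × String) := [("**", ""), ("`", ""), ("|", " | ")]
  replacements.foldl (fun text p => PySem.Str.replace text p.1 p.2) markdown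

-- ===== PORT B =====
-- emit one character of the scan (skip '`', expand '|', copy otherwise)
def pvEmit (c : Char) (rest : List Char) : List Char :=
  if c = '`' then rest
  else if c = '|' then ' ' :: '|' :: ' ' :: rest
  else c :: rest

-- the single left-to-right scan of Source B (one-character lookahead for '**')
def pvScan : List Char → List Char
  | [] => []
  | [c] => pvEmit c []
  | c :: c' :: t => if c = '*' ∧ c' = '*' then pvScan t else pvEmit c (pvScan (c' :: t))

def build_plain_text_report_alt (markdown : String) : String :=
  String.ofList (pvScan markdown.toList)

-- ===== PRECONDITION & SPEC =====
def Spec_build_plain_text_report (markdown : String) (out : String) : Prop := out = build_plain_text_report_alt markdown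
instance (markdown : String) (out : String) : Decidable (Spec_build_plain_text_report markdown out) := by unfold Spec_build_plain_text_report; infer_instance

-- ===== CLAIM (what is proved, stated in full; the proofs are below) =====
def Claim_equal_build_plain_text_report : Prop := ∀ (markdown : String), Dom_build_plain_text_report markdown → Spec_build_plain_text_report markdown (build_plain_text_report markdown)

-- ===== LEMMAS AND PROOFS =====

-- the first replace pass ("**" → "") as a recursive scan
def pvStarPass : List Char → List Char
  | [] => []
  | [c] => [c]
  | c :: c' :: t => if c = '*' ∧ c' = '*' then pvStarPass t else c :: pvStarPass (c' :: t)

lemma go_star (fuel : Nat) : ∀ (l acc : List Char), l.length ≤ fuel →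
    PySem.Chars.replace.go ['*', '*'] [] fuel l acc = acc.reverse ++ pvStarPass l := by
  induction fuel with
  | zero =>
    intro l acc h
    have : l = [] := List.eq_nil_of_length_eq_zero (Nat.le_zero.mp h)
    subst this
    simp [PySem.Chars.replace.go, pvStarPass]
  | succ n ih =>
    intro l acc h
    match l with
    | [] => simp [PySem.Chars.replace.go, pvStarPass]
    | [c] =>
      rw [PySem.Chars.replace.go]
      have hp : List.isPrefixOf ['*', '*'] [c] = false := by
        simp [List.isPrefixOf]
      rw [hp]
      simp only [Bool.false_eq_true, if_false]
      rw [ih [] (c :: acc) (by simp)]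
      simp [pvStarPass]
    | c :: c' :: t =>
      rw [PySem.Chars.replace.go]
      by_cases hcc : c = '*' ∧ c' = '*'
      · obtain ⟨h1, h2⟩ := hcc
        subst h1; subst h2
        have hp : List.isPrefixOf ['*', '*'] ('*' :: '*' :: t) = true := by
          simp [List.isPrefixOf]
        rw [hp]
        simp only [if_true]
        have ht : t.length ≤ n := by simp at h; omega
        rw [show List.drop (List.length ['*','*']) ('*' :: '*' :: t) = t by simp]
        rw [ih t ((([] : List Char).reverse) ++ acc) ht]
        simp [pvStarPass]
      · have hp : List.isPrefixOf ['*', '*'] (c :: c' :: t) = false := by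
          simp [List.isPrefixOf]
          intro h1 h2; exact hcc ⟨h1.symm, h2.symm⟩
        rw [hp]
        simp only [Bool.false_eq_true, if_false]
        have ht : (c' :: t).length ≤ n := by simp at h ⊢; omega
        rw [ih (c' :: t) (c :: acc) ht]
        simp [pvStarPass, hcc]

lemma go_single (p : Char) (r : List Char) (fuel : Nat) : ∀ (l acc : List Char), l.length ≤ fuel →
    PySem.Chars.replace.go [p] r fuel l acc
      = acc.reverse ++ l.flatMap (fun c => if c = p then r else [c]) := by
  induction fuel with
  | zero =>
    intro l acc h
    have : l = [] := List.eq_nil_of_length_eq_zero (Nat.le_zero.mp h)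
    subst this
    simp [PySem.Chars.replace.go]
  | succ n ih =>
    intro l acc h
    match l with
    | [] => simp [PySem.Chars.replace.go]
    | c :: t =>
      rw [PySem.Chars.replace.go]
      have ht : t.length ≤ n := by simp at h; omega
      by_cases hc : c = p
      · subst hc
        have hp : List.isPrefixOf [c] (c :: t) = true := by simp [List.isPrefixOf]
        rw [hp]
        simp only [if_true]
        rw [show List.drop (List.length [c]) (c :: t) = t by simp]
        rw [ih t (r.reverse ++ acc) ht]
        simp
      · have hp : List.isPrefixOf [p] (c :: t) = false := by
          simp [List.isPrefixOf]; exact fun h' => hc h'.symm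
        rw [hp]
        simp only [Bool.false_eq_true, if_false]
        rw [ih t (c :: acc) ht]
        simp [hc]

lemma replace_star (l : List Char) :
    PySem.Chars.replace l ['*', '*'] [] = pvStarPass l := by
  rw [PySem.Chars.replace]
  simp only [List.isEmpty_cons, Bool.false_eq_true, if_false]
  simpa using go_star l.length l [] (le_refl _)

lemma replace_single (l : List Char) (p : Char) (r : List Char) :
    PySem.Chars.replace l [p] r = l.flatMap (fun c => if c = p then r else [c]) := by
  rw [PySem.Chars.replace]
  simp only [List.isEmpty_cons, Bool.false_eq_true, if_false]
  simpa using go_single p r l.length l [] (le_refl _)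

-- the second and third passes combined, per character
def pvH (c : Char) : List Char :=
  if c = '`' then [] else if c = '|' then [' ', '|', ' '] else [c]

lemma flatMap_two (l : List Char) :
    (l.flatMap (fun c => if c = '`' then ([] : List Char) else [c])).flatMap
        (fun c => if c = '|' then [' ', '|', ' '] else [c])
      = l.flatMap pvH := by
  rw [List.flatMap_assoc]
  apply List.flatMap_congr  -- pointwise
  intro c _
  by_cases h1 : c = '`'
  · simp [h1, pvH]
  · by_cases h2 : c = '|'
    · simp [h2, pvH]
    · simp [h1, h2, pvH]

lemma starPass_flatMap (l : List Char) :
    (pvStarPass l).flatMap pvH = pvScan l := by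
  induction l using pvStarPass.induct with
  | case1 => simp [pvStarPass, pvScan]
  | case2 c =>
    simp only [pvStarPass, pvScan]
    by_cases h1 : c = '`'
    · simp [h1, pvH, pvEmit]
    · by_cases h2 : c = '|'
      · simp [h2, pvH, pvEmit]
      · simp [h1, h2, pvH, pvEmit]
  | case3 c c' t hcc ih =>
    simp only [pvStarPass, pvScan, hcc]
    exact ih
  | case4 c c' t hcc ih =>
    simp only [pvStarPass, pvScan, hcc, if_false]
    rw [List.flatMap_cons, ih]
    by_cases h1 : c = '`'
    · simp [h1, pvH, pvEmit]
    · by_cases h2 : c = '|'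
      · simp [h2, pvH, pvEmit]
      · simp [h1, h2, pvH, pvEmit]

lemma chars_eq (l : List Char) :
    PySem.Chars.replace (PySem.Chars.replace (PySem.Chars.replace l ['*', '*'] []) ['`'] [])
        ['|'] [' ', '|', ' '] = pvScan l := by
  rw [replace_star, replace_single, replace_single, flatMap_two, starPass_flatMap]

-- ===== VERDICT (by name: the statement is the Claim_ definition above) =====
theorem build_plain_text_report_spec : Claim_equal_build_plain_text_report := by
  intro markdown _
  unfold Spec_build_plain_text_report build_plain_text_report build_plain_text_report_alt
  simp only [List.foldl, PySem.Str.replace, String.toList_ofList]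
  congr 1
  have h1 : ("**" : String).toList = ['*', '*'] := rfl
  have h2 : ("" : String).toList = [] := rfl
  have h3 : ("`" : String).toList = ['`'] := rfl
  have h4 : ("|" : String).toList = ['|'] := rfl
  have h5 : (" | " : String).toList = [' ', '|', ' '] := rfl
  rw [h1, h2, h3, h4, h5, chars_eq]
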